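-- pv_equiv track=rewrite | github.com/nazroll/wzrdbrain | slm/evaluate.py | generate_test_prompts
-- ===== SOURCE A (Python) =====
-- def generate_test_prompts(count: int = 100) -> list[str]:
--     """Generate diverse test prompts."""
--     prompts = []
--     for i in range(count):
--         n = (i % 4) + 2  # 2-5 tricks
--         templates = [
--             f"Generate a {n}-trick combo.",
--             f"Give me a {n}-trick wizard skating combo.",
--             f"Create a combo with {n} tricks.",
--             f"I want a {n}-trick combo please.",
--         ]
--         prompts.append(templates[i % len(templates)])
--     return prompts
-- ===== SOURCE B (Python) =====
-- _PROMPTS = [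
--     "Generate a 2-trick combo.",
--     "Give me a 3-trick wizard skating combo.",
--     "Create a combo with 4 tricks.",
--     "I want a 5-trick combo please.",
-- ]
--
-- def generate_test_prompts(count: int = 100) -> list[str]:
--     """Generate diverse test prompts."""
--     if count <= 0:
--         return []
--     q, r = divmod(count, 4)
--     return _PROMPTS * q + _PROMPTS[:r]
-- ===== Notes on version B (the rewrite author's own statement) =====
-- stated objective: simpler
-- what changed: A loops over every index, reformatting and rebuilding a 4-template list per iteration and selecting by i%4; B has no per-index loop at all: the four prompts are constants, and the result is assembled in blocks as count//4 repetitions of the whole cycle (list repetition) plus a slice of the first count%4 prompts.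
import Mathlib
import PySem

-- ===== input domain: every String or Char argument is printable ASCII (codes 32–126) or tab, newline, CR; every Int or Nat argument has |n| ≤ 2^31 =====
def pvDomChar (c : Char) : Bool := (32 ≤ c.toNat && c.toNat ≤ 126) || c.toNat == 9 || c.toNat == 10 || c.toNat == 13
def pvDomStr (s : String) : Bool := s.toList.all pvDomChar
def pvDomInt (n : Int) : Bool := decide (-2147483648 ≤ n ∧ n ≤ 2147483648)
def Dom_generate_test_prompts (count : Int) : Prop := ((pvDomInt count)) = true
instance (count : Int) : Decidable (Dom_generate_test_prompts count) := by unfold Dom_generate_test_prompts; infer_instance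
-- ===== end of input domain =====

-- B drops the per-index loop entirely: the four prompts are constants and the output is
-- assembled in blocks — count//4 repetitions of the whole cycle plus the first count%4
-- prompts (simpler).

-- ===== PORT A =====
-- templates[i % len(templates)]: the index i%4 is always in range, so pyGetD with a
-- dummy default is exact here.
def generate_test_prompts (count : Int) : List String :=
  (PySem.List.pyRange 0 count 1).foldl (fun prompts i =>
    let n : Int := PySem.Int.mod i 4 + 2
    let templates : List String :=
      [ "Generate a " ++ PySem.Int.toStr n ++ "-trick combo.",
        "Give me a " ++ PySem.Int.toStr n ++ "-trick wizard skating combo.",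
        "Create a combo with " ++ PySem.Int.toStr n ++ " tricks.",
        "I want a " ++ PySem.Int.toStr n ++ "-trick combo please." ]
    prompts ++ [PySem.List.pyGetD templates (PySem.Int.mod i (templates.length : Int)) ""]) []

-- ===== PORT B =====
def pvPROMPTS : List String :=
  [ "Generate a 2-trick combo.",
    "Give me a 3-trick wizard skating combo.",
    "Create a combo with 4 tricks.",
    "I want a 5-trick combo please." ]

-- _PROMPTS * q is (List.replicate q _PROMPTS).flatten; _PROMPTS[:r] is List.take r.toNat
-- (exact here since 0 ≤ r = count % 4 < 4); divmod(count, 4) with count > 0 is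
-- (floordiv, mod).
def generate_test_prompts_alt (count : Int) : List String :=
  if count ≤ 0 then []
  else
    let q := PySem.Int.floordiv count 4
    let r := PySem.Int.mod count 4
    (List.replicate q.toNat pvPROMPTS).flatten ++ pvPROMPTS.take r.toNat

-- ===== PRECONDITION & SPEC =====
def Spec_generate_test_prompts (count : Int) (out : List String) : Prop := out = generate_test_prompts_alt count
instance (count : Int) (out : List String) : Decidable (Spec_generate_test_prompts count out) := by unfold Spec_generate_test_prompts; infer_instance

-- ===== CLAIM (what is proved, stated in full; the proofs are below) =====
def Claim_equal_generate_test_prompts : Prop := ∀ (count : Int), Dom_generate_test_prompts count → Spec_generate_test_prompts count (generate_test_prompts count)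

-- ===== LEMMAS AND PROOFS =====

-- the canonical form both sides are reduced to
def pvCycle (k : Nat) : String := pvPROMPTS.getD (k % 4) ""

-- the cast length of a 4-element string list, as a rewrite rule for the proof below
theorem pv_len4 (a b c d : String) : ((([a,b,c,d] : List String).length : Nat) : Int) = 4 := rfl

-- A side: the fold is a map over range(count); each freshly formatted templates[i%4]
-- is literally the corresponding constant prompt.
theorem pv_A_eq_map (count : Int) :
    generate_test_prompts count = (List.range count.toNat).map pvCycle := by
  unfold generate_test_prompts
  rw [PySem.List.foldl_append_singleton_eq_map]
  simp only [List.nil_append, PySem.List.pyRange_one, List.map_map, sub_zero]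
  refine List.map_congr_left ?_
  intro k _
  simp only [Function.comp, zero_add]
  have hm : PySem.Int.mod (k : Int) 4 = ((k % 4 : Nat) : Int) := by
    rw [PySem.Int.mod_eq_emod_of_pos (by norm_num)]
    push_cast
    ring
  have : k % 4 = 0 ∨ k % 4 = 1 ∨ k % 4 = 2 ∨ k % 4 = 3 := by omega
  rcases this with h | h | h | h <;>
    simp only [pv_len4, hm, h, pvCycle, pvPROMPTS, PySem.Int.toStr] <;> decide

-- block form in Nat: q whole cycles plus the first r prompts equal the cycle map on range
theorem pv_blocks (q r : Nat) (hr : r ≤ 4) :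
    (List.replicate q pvPROMPTS).flatten ++ pvPROMPTS.take r
      = (List.range (4 * q + r)).map pvCycle := by
  induction q with
  | zero =>
      simp only [List.replicate, List.flatten_nil, List.nil_append, Nat.mul_zero, Nat.zero_add]
      interval_cases r <;> decide
  | succ q ih =>
      have hn : 4 * (q + 1) + r = 4 + (4 * q + r) := by ring
      rw [hn, List.range_add, List.map_append, List.map_map]
      have h4 : (List.range 4).map pvCycle = pvPROMPTS := by decide
      have hshift : ((List.range (4 * q + r)).map (pvCycle ∘ (4 + ·)))
          = (List.range (4 * q + r)).map pvCycle := by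
        refine List.map_congr_left ?_
        intro k _
        simp only [Function.comp, pvCycle]
        congr 1
        omega
      rw [hshift, ← ih, h4]
      simp [List.replicate_succ]

-- B side: for count > 0, divmod decomposes count.toNat as 4*q + r with r < 4
theorem pv_B_eq_map (count : Int) :
    generate_test_prompts_alt count = (List.range count.toNat).map pvCycle := by
  unfold generate_test_prompts_alt
  split_ifs with h
  · have : count.toNat = 0 := by omega
    simp [this]
  · have hpos : 0 < count := by omega
    have hq : PySem.Int.floordiv count 4 = count / 4 :=
      PySem.Int.floordiv_eq_ediv_of_pos (by norm_num)
    have hr : PySem.Int.mod count 4 = count % 4 :=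
      PySem.Int.mod_eq_emod_of_pos (by norm_num)
    simp only [hq, hr]
    have hr0 : 0 ≤ count % 4 := Int.emod_nonneg count (by norm_num)
    have hr4 : count % 4 < 4 := Int.emod_lt_of_pos count (by norm_num)
    have hq0 : 0 ≤ count / 4 := Int.ediv_nonneg (le_of_lt hpos) (by norm_num)
    have hcnt : 4 * (count / 4).toNat + (count % 4).toNat = count.toNat := by
      have := Int.emod_add_mul_ediv count 4
      omega
    rw [pv_blocks (count / 4).toNat (count % 4).toNat (by omega), hcnt]

-- ===== VERDICT (by name: the statement is the Claim_ definition above) =====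
theorem generate_test_prompts_spec : Claim_equal_generate_test_prompts := by
  intro count _
  unfold Spec_generate_test_prompts
  rw [pv_A_eq_map, pv_B_eq_map]
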